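-- pv_equiv track=rewrite | github.com/kshitiz-arora/RISC-V-Simulator | Files/aarushi.py | int_to_signed
-- ===== SOURCE A (Python) =====
-- def int_to_signed(val):
--     if (val < 0):
--         s = bin(-1*val)[2:].zfill(32)
--         s = s[-32:]
--         rs = '0b'
--         for bit in s:
--             rs += str(int(1 ^ int(bit)))
--         return '0x'+hex(int(rs, 2)+1)[2:].zfill(8)
--         # return hex(val+(1<<32))
--     return '0x'+hex(val)[2:].zfill(8)
-- ===== SOURCE B (Python) =====
-- def int_to_signed(val):
--     # Two's-complement low 32 bits via Python's floor modulo, formatted as 8+ hex digits.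
--     return '0x' + format(val % 0x100000000, '08x')
-- ===== Notes on version B (the rewrite author's own statement) =====
-- stated objective: simpler
-- what changed: Replaces the bit-string build/zfill/slice/invert-loop/reparse pipeline of the negative branch with a single arithmetic expression val % 2**32 formatted as zero-padded hex (no branch at all).
import Mathlib
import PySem

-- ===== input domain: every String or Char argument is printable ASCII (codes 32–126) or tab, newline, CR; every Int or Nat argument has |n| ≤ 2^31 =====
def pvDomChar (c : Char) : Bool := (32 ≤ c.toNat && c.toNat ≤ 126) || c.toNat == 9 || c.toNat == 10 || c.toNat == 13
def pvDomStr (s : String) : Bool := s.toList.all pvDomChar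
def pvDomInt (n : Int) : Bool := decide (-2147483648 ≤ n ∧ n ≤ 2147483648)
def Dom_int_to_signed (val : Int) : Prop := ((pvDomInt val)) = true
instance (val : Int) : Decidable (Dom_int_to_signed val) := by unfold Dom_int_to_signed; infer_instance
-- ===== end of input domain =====

-- B replaces A's bit-string build/zfill/slice/invert-loop/reparse negative branch by the single
-- arithmetic expression val % 2**32 rendered as zero-padded hex (objective: simpler).

-- ===== PORT A =====
-- hand port of int(rs, 2) restricted to rs = '0b' + binary digits: parse of the digit part
-- (exact here: in int_to_signed, rs is always '0b' followed by chars that are each '0' or '1')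
def pvBinParse (cs : List Char) : Nat :=
  cs.foldl (fun a c => 2 * a + (if c = '1' then 1 else 0)) 0

-- hex(x)[2:] for x ≥ 0 is exactly Nat.toDigits 16 x (lowercase digits, '0' for 0);
-- int(bit) is ported as bit.toNat - 48 (exact: bit is '0' or '1' here)
def int_to_signed (val : Int) : String :=
  if val < 0 then
    let s := PySem.Chars.zfill
      (PySem.List.slice (PySem.Int.pyBin (-1 * val)).toList (some 2) none) 32
    let s := PySem.List.slice s (some (-32)) none
    let rs := s.foldl
      (fun rs bit => rs ++ (PySem.Int.toStr (PySem.Int.bxor 1 ((bit.toNat : Int) - 48))).toList)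
      ['0', 'b']
    "0x" ++ PySem.Str.zfill (String.ofList (Nat.toDigits 16 (pvBinParse (rs.drop 2) + 1))) 8
  else
    "0x" ++ PySem.Str.zfill (String.ofList (Nat.toDigits 16 val.toNat)) 8

-- ===== PORT B =====
-- format(x, '08x') for x ≥ 0 is the lowercase hex digits (Nat.toDigits 16) zero-filled to width 8
def int_to_signed_alt (val : Int) : String :=
  "0x" ++ PySem.Str.zfill
    (String.ofList (Nat.toDigits 16 (PySem.Int.mod val 4294967296).toNat)) 8

-- ===== PRECONDITION & SPEC =====
def Spec_int_to_signed (val : Int) (out : String) : Prop := out = int_to_signed_alt val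
instance (val : Int) (out : String) : Decidable (Spec_int_to_signed val out) := by unfold Spec_int_to_signed; infer_instance

-- ===== CLAIM (what is proved, stated in full; the proofs are below) =====
def Claim_equal_int_to_signed : Prop := ∀ (val : Int), Dom_int_to_signed val → Spec_int_to_signed val (int_to_signed val)

-- ===== LEMMAS AND PROOFS =====

-- characters produced by binary Nat.toDigits are '0' or '1'
theorem pvToDigits2_bits (n : Nat) : ∀ c ∈ Nat.toDigits 2 n, c = '0' ∨ c = '1' := by
  induction n using Nat.strong_induction_on with
  | _ n ih =>
    rw [Nat.toDigits_eq_if (by norm_num)]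
    split_ifs with h
    · intro c hc
      simp only [List.mem_singleton] at hc
      interval_cases n <;> simp [hc, Nat.digitChar]
    · intro c hc
      rw [List.mem_append] at hc
      rcases hc with hc | hc
      · exact ih (n / 2) (by omega) c hc
      · simp only [List.mem_singleton] at hc
        have h2 : n % 2 = 0 ∨ n % 2 = 1 := by omega
        rcases h2 with h2 | h2 <;> simp [hc, h2, Nat.digitChar]

-- pvBinParse is a left inverse of binary Nat.toDigits
theorem pvBinParse_toDigits (n : Nat) : pvBinParse (Nat.toDigits 2 n) = n := by
  induction n using Nat.strong_induction_on with
  | _ n ih =>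
    rw [Nat.toDigits_eq_if (by norm_num)]
    split_ifs with h
    · interval_cases n <;> simp [pvBinParse, Nat.digitChar]
    · have hrec := ih (n / 2) (by omega)
      have h2 : n % 2 = 0 ∨ n % 2 = 1 := by omega
      rcases h2 with h2 | h2 <;>
        simp [pvBinParse, List.foldl_append, h2, Nat.digitChar] at hrec ⊢ <;> omega

-- a run of leading '0' characters does not change pvBinParse
theorem pvBinParse_zeros (k : Nat) (ds : List Char) :
    pvBinParse (List.replicate k '0' ++ ds) = pvBinParse ds := by
  induction k with
  | zero => rfl
  | succ k ih => simpa [pvBinParse, List.replicate_succ] using ih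

-- folding an append-step over a list is the flatMap appended to the seed
theorem pvFoldl_append {α : Type} (g : Char → List α) :
    ∀ (s : List Char) (r : List α),
      s.foldl (fun rs bit => rs ++ g bit) r = r ++ s.flatMap g := by
  intro s
  induction s with
  | nil => simp
  | cons c t ih => intro r; simp [List.foldl_cons, ih, List.flatMap_cons]

-- on '0'/'1' characters the Python step str(1 ^ int(bit)) emits the flipped bit
theorem pvFlat_inv (s : List Char) (hs : ∀ c ∈ s, c = '0' ∨ c = '1') :
    s.flatMap (fun bit => (PySem.Int.toStr (PySem.Int.bxor 1 ((bit.toNat : Int) - 48))).toList)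
      = s.map (fun c => if c = '0' then '1' else '0') := by
  induction s with
  | nil => rfl
  | cons c t ih =>
    have hc := hs c (List.mem_cons_self ..)
    have ht := ih (fun d hd => hs d (List.mem_cons_of_mem _ hd))
    rcases hc with hc | hc <;> subst hc <;>
      simp only [List.flatMap_cons, List.map_cons, ht] <;> congr 1

-- parse of a bit string and of its flip sum to 2^length - 1 (accumulator form)
theorem pvParse_inv_acc (s : List Char) (hs : ∀ c ∈ s, c = '0' ∨ c = '1') :
    ∀ (a b : Nat),
      (s.map (fun c => if c = '0' then '1' else '0')).foldl
          (fun a c => 2 * a + (if c = '1' then 1 else 0)) a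
        + s.foldl (fun a c => 2 * a + (if c = '1' then 1 else 0)) b + 1
      = (a + b + 1) * 2 ^ s.length := by
  induction s with
  | nil => intro a b; simp
  | cons c t ih =>
    intro a b
    have hc := hs c (List.mem_cons_self ..)
    have ht := ih (fun d hd => hs d (List.mem_cons_of_mem _ hd))
    rcases hc with hc | hc <;> subst hc <;>
    · simp only [List.map_cons, List.foldl_cons, List.length_cons, Char.reduceEq,
        if_true, if_false]
      rw [ht]
      ring

theorem pvParse_inv (s : List Char) (hs : ∀ c ∈ s, c = '0' ∨ c = '1') :
    pvBinParse (s.map (fun c => if c = '0' then '1' else '0')) + pvBinParse s + 1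
      = 2 ^ s.length := by
  simpa [pvBinParse] using pvParse_inv_acc s hs 0 0

-- zfill of a sign-free digit string of length ≤ 32 is left padding with '0'
theorem pvZfill32 (ds : List Char) (hne : ds ≠ [])
    (hb : ∀ c ∈ ds, c = '0' ∨ c = '1') :
    PySem.Chars.zfill ds 32 = List.replicate (32 - ds.length) '0' ++ ds := by
  cases ds with
  | nil => exact absurd rfl hne
  | cons c rest =>
    have hc := hb c (List.mem_cons_self ..)
    have hc' : ¬(c = '+' ∨ c = '-') := by rcases hc with hc | hc <;> subst hc <;> decide
    unfold PySem.Chars.zfill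
    by_cases h : (32:Int) ≤ ((c :: rest).length : Int)
    · rw [if_pos h]
      have hlen : 32 ≤ (c :: rest).length := by exact_mod_cast h
      rw [show 32 - (c :: rest).length = 0 from by omega, List.replicate_zero, List.nil_append]
    · rw [if_neg h]
      show (if c = '+' ∨ c = '-' then
              c :: (List.replicate (((32:Int)).toNat - (c :: rest).length) '0' ++ rest)
            else List.replicate (((32:Int)).toNat - (c :: rest).length) '0' ++ (c :: rest)) = _
      rw [if_neg hc']
      norm_num
      rfl

-- ===== VERDICT (by name: the statement is the Claim_ definition above) =====
theorem int_to_signed_spec : Claim_equal_int_to_signed := by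
  intro val hdom
  unfold Spec_int_to_signed int_to_signed int_to_signed_alt
  have hdom' : -2147483648 ≤ val ∧ val ≤ 2147483648 := by
    simpa [Dom_int_to_signed, pvDomInt] using hdom
  by_cases hv : val < 0
  · rw [if_pos hv]
    -- the binary digit string of -val
    obtain ⟨n, rfl⟩ : ∃ n : Nat, val = -(n : Int) := ⟨(-val).toNat, by omega⟩
    have hn1 : 1 ≤ n := by omega
    have hn2 : n ≤ 2147483648 := by omega
    have hbin : (PySem.Int.pyBin (-1 * -(n : Int))).toList = '0' :: 'b' :: Nat.toDigits 2 n := by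
      rw [PySem.Int.toList_pyBin]
      unfold PySem.Int.toBinChars0b
      rw [if_neg (by omega)]
      have h1 : (-1 : Int) * -(n:Int) = (n:Int) := by ring
      rw [h1, Int.toNat_natCast]
    have hslice2 : PySem.List.slice (PySem.Int.pyBin (-1 * -(n : Int))).toList (some 2) none
        = Nat.toDigits 2 n := by
      rw [PySem.List.slice_from ((PySem.Int.pyBin (-1 * -(n : Int))).toList)
        (by norm_num : (0:Int) ≤ 2), hbin]
      rfl
    set ds := Nat.toDigits 2 n with hds
    have hbits : ∀ c ∈ ds, c = '0' ∨ c = '1' := pvToDigits2_bits n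
    have hlen : ds.length ≤ 32 := by
      rw [hds]
      rw [Nat.length_toDigits_le_iff (by norm_num) (by norm_num)]
      have : (2:Nat) ^ 32 = 4294967296 := by norm_num
      omega
    have hne : ds ≠ [] := List.ne_nil_of_length_pos Nat.length_toDigits_pos
    set z := List.replicate (32 - ds.length) '0' ++ ds with hz
    have hzfill : PySem.Chars.zfill ds 32 = z := pvZfill32 ds hne hbits
    have hzlen : z.length = 32 := by
      rw [hz]; simp only [List.length_append, List.length_replicate]; omega
    have hzbits : ∀ c ∈ z, c = '0' ∨ c = '1' := by
      intro c hc
      rw [hz, List.mem_append] at hc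
      rcases hc with hc | hc
      · left; exact List.eq_of_mem_replicate hc
      · exact hbits c hc
    have hslice32 : PySem.List.slice z (some (-32)) none = z := by
      rw [PySem.List.slice_from_neg_ofNat z 32 (by norm_num), hzlen]
      simp
    have hfold : z.foldl
        (fun rs bit => rs ++ (PySem.Int.toStr (PySem.Int.bxor 1 ((bit.toNat : Int) - 48))).toList)
        ['0', 'b']
        = ['0', 'b'] ++ z.map (fun c => if c = '0' then '1' else '0') := by
      rw [pvFoldl_append, pvFlat_inv z hzbits]
    have hzval : pvBinParse z = n := by
      rw [hz, pvBinParse_zeros, hds, pvBinParse_toDigits]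
    have hsum := pvParse_inv z hzbits
    rw [hzlen] at hsum
    have hA : pvBinParse
        ((['0', 'b'] ++ z.map (fun c => if c = '0' then '1' else '0')).drop 2) + 1
        = 4294967296 - n := by
      have hdrop : (['0', 'b'] ++ z.map (fun c => if c = '0' then '1' else '0')).drop 2
          = z.map (fun c => if c = '0' then '1' else '0') := rfl
      have h32 : (2:Nat) ^ 32 = 4294967296 := by norm_num
      rw [hdrop]
      omega
    have hB : (PySem.Int.mod (-(n : Int)) 4294967296).toNat = 4294967296 - n := by
      rw [PySem.Int.mod_eq_emod_of_pos (by norm_num)]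
      omega
    simp only [hslice2, hzfill, hslice32, hfold, hA, hB]
  · rw [if_neg hv]
    have hB : (PySem.Int.mod val 4294967296).toNat = val.toNat := by
      rw [PySem.Int.mod_eq_emod_of_pos (by norm_num)]
      omega
    rw [hB]
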